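-- pv_equiv track=rewrite | github.com/Benjamin-Duke/MLA_Wave2Vec | beam_decoder.py | tokens_to_words
-- ===== SOURCE A (Python) =====
-- from typing import List, Dict
--
-- def tokens_to_words(tokens: List[int], vocab: Dict[int, str]) -> List[str]:
--     """Convert token IDs to words using the vocabulary.
--
--     Args:
--         tokens: List of token IDs
--         vocab: Dictionary mapping token IDs to words
--
--     Returns:
--         List of words
--     """
--     words = []
--     current_word = []
--
--     for token in tokens:
--         if token in vocab:
--             word = vocab[token]
--             if word == '<space>' or word == ' ':
--                 if current_word:
--                     words.append(''.join(current_word))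
--                     current_word = []
--             else:
--                 current_word.append(word)
--
--     if current_word:
--         words.append(''.join(current_word))
--
--     return words
-- ===== SOURCE B (Python) =====
-- from typing import List, Dict
--
-- def tokens_to_words(tokens: List[int], vocab: Dict[int, str]) -> List[str]:
--     """Map tokens to their vocab pieces first, then cut the piece list at
--     separator pieces ('<space>' or ' ') by scanning maximal runs."""
--     def is_sep(w):
--         return w == '<space>' or w == ' '
--     pieces = [vocab[t] for t in tokens if t in vocab]
--     words = []
--     i, n = 0, len(pieces)
--     while i < n:
--         if is_sep(pieces[i]):
--             i += 1
--             continue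
--         j = i
--         while j < n and not is_sep(pieces[j]):
--             j += 1
--         words.append(''.join(pieces[i:j]))
--         i = j
--     return words
-- ===== Notes on version B (the rewrite author's own statement) =====
-- stated objective: alternative
-- what changed: B first maps tokens through the vocab into a piece list (dropping non-vocab tokens), then cuts that list into words by scanning maximal runs of non-separator pieces, instead of A's single pass with a current-word accumulator and flush-on-space.
import Mathlib
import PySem

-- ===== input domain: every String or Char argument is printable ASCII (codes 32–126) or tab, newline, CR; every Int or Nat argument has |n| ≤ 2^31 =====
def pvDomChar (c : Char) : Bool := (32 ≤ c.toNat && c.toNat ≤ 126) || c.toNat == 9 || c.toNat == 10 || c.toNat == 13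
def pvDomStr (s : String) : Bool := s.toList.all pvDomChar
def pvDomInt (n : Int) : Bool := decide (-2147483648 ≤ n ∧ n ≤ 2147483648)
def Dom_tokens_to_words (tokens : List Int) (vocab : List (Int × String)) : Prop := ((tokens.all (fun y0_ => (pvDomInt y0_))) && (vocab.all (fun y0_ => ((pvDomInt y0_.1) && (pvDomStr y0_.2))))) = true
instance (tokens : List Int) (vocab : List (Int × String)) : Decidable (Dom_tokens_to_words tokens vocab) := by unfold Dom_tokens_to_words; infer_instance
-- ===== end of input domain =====

-- B builds the piece list up front and cuts it at separators by maximal-run scanning; A flushes an accumulator. Same values, proved below.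

-- ===== PORT A =====
-- one loop step of A: lookup, flush current word on a separator, else extend it
def t2wStep (vocab : List (Int × String)) (st : List String × List String) (token : Int) :
    List String × List String :=
  match (PySem.Dict.mk vocab).get? token with
  | some w =>
      if w == "<space>" || w == " " then
        if !st.2.isEmpty then (st.1 ++ [PySem.Str.join "" st.2], []) else st
      else (st.1, st.2 ++ [w])
  | none => st

def tokens_to_words (tokens : List Int) (vocab : List (Int × String)) : List String :=
  let s := tokens.foldl (t2wStep vocab) ([], [])
  if !s.2.isEmpty then s.1 ++ [PySem.Str.join "" s.2] else s.1

-- ===== PORT B =====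
def ttwIsSep (w : String) : Bool := w == "<space>" || w == " "

-- B's while loop over the remaining suffix: skip a separator, else cut off the maximal non-separator run
def ttwSplit : List String → List String
  | [] => []
  | p :: rest =>
    if ttwIsSep p then ttwSplit rest
    else PySem.Str.join "" ((p :: rest).takeWhile (fun q => !ttwIsSep q)) ::
         ttwSplit ((p :: rest).dropWhile (fun q => !ttwIsSep q))
  termination_by l => l.length
  decreasing_by
    · simp only [List.length_cons]; omega
    · rename_i h
      rw [List.dropWhile_cons_of_pos (by simpa using h)]
      simp only [List.length_cons]
      exact Nat.lt_succ_of_le (List.length_dropWhile_le _ _)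

def tokens_to_words_alt (tokens : List Int) (vocab : List (Int × String)) : List String :=
  ttwSplit (tokens.filterMap (fun t => (PySem.Dict.mk vocab).get? t))

-- ===== PRECONDITION & SPEC =====
def Spec_tokens_to_words (tokens : List Int) (vocab : List (Int × String)) (out : List String) : Prop := out = tokens_to_words_alt tokens vocab
instance (tokens : List Int) (vocab : List (Int × String)) (out : List String) : Decidable (Spec_tokens_to_words tokens vocab out) := by unfold Spec_tokens_to_words; infer_instance

-- ===== CLAIM (what is proved, stated in full; the proofs are below) =====
def Claim_equal_tokens_to_words : Prop := ∀ (tokens : List Int) (vocab : List (Int × String)), Dom_tokens_to_words tokens vocab → Spec_tokens_to_words tokens vocab (tokens_to_words tokens vocab)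

-- ===== LEMMAS AND PROOFS =====

@[simp] lemma ttwSplit_nil : ttwSplit [] = [] := by rw [ttwSplit.eq_1]

lemma ttwSplit_cons_sep {p : String} {rest : List String} (h : ttwIsSep p = true) :
    ttwSplit (p :: rest) = ttwSplit rest := by rw [ttwSplit.eq_2]; simp [h]

lemma ttwSplit_cons_word {p : String} {rest : List String} (h : ttwIsSep p = false) :
    ttwSplit (p :: rest) =
      PySem.Str.join "" (p :: rest.takeWhile (fun q => !ttwIsSep q)) ::
        ttwSplit (rest.dropWhile (fun q => !ttwIsSep q)) := by
  rw [ttwSplit.eq_2]; simp [h, List.takeWhile, List.dropWhile]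

-- A's loop step, expressed on the already-looked-up piece
def ttwG (st : List String × List String) (w : String) : List String × List String :=
  if ttwIsSep w then
    if !st.2.isEmpty then (st.1 ++ [PySem.Str.join "" st.2], []) else st
  else (st.1, st.2 ++ [w])

lemma t2wStep_eq_filterMap (vocab : List (Int × String)) :
    ∀ (tokens : List Int) (st : List String × List String),
      tokens.foldl (t2wStep vocab) st =
        (tokens.filterMap (fun t => (PySem.Dict.mk vocab).get? t)).foldl ttwG st := by
  intro tokens
  induction tokens with
  | nil => intro st; rfl
  | cons t ts ih =>
    intro st
    cases h : (PySem.Dict.mk vocab).get? t with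
    | none =>
      simp only [List.foldl_cons, List.filterMap_cons, h]
      have hpt : t2wStep vocab st t = st := by simp [t2wStep, h]
      rw [hpt, ih st]
    | some w =>
      simp only [List.foldl_cons, List.filterMap_cons, h]
      have hpt : t2wStep vocab st t = ttwG st w := by
        simp only [t2wStep, ttwG, ttwIsSep, h]
        rfl
      rw [hpt, ih]

def ttwFinalize (s : List String × List String) : List String :=
  if !s.2.isEmpty then s.1 ++ [PySem.Str.join "" s.2] else s.1

lemma ttw_main : ∀ (ps ws cur : List String),
    ttwFinalize (ps.foldl ttwG (ws, cur)) =
      ws ++ (if cur.isEmpty then ttwSplit ps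
             else PySem.Str.join "" (cur ++ ps.takeWhile (fun q => !ttwIsSep q)) ::
                  ttwSplit (ps.dropWhile (fun q => !ttwIsSep q))) := by
  intro ps
  induction ps with
  | nil =>
    intro ws cur
    cases cur with
    | nil => simp [ttwFinalize]
    | cons c cs => simp [ttwFinalize]
  | cons p ps' ih =>
    intro ws cur
    rw [List.foldl_cons]
    by_cases hsep : ttwIsSep p = true
    · have htw : (p :: ps').takeWhile (fun q => !ttwIsSep q) = [] := by
        simp [List.takeWhile, hsep]
      have hdw : (p :: ps').dropWhile (fun q => !ttwIsSep q) = p :: ps' := by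
        simp [List.dropWhile, hsep]
      cases hc : cur.isEmpty with
      | true =>
        have hcur : cur = [] := by cases cur <;> simp_all
        subst hcur
        have hstep : ttwG (ws, []) p = (ws, []) := by simp [ttwG, hsep]
        rw [hstep, ih ws []]
        simp [ttwSplit_cons_sep hsep]
      | false =>
        have hcne : (!cur.isEmpty) = true := by simp [hc]
        have hstep : ttwG (ws, cur) p = (ws ++ [PySem.Str.join "" cur], []) := by
          simp [ttwG, hsep, hcne]
        rw [hstep, ih (ws ++ [PySem.Str.join "" cur]) []]
        simp [htw, hdw, ttwSplit_cons_sep hsep]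
    · have hsep' : ttwIsSep p = false := by simp_all
      have htw : (p :: ps').takeWhile (fun q => !ttwIsSep q) = p :: ps'.takeWhile (fun q => !ttwIsSep q) := by
        simp [List.takeWhile, hsep']
      have hdw : (p :: ps').dropWhile (fun q => !ttwIsSep q) = ps'.dropWhile (fun q => !ttwIsSep q) := by
        simp [List.dropWhile, hsep']
      have hstep : ttwG (ws, cur) p = (ws, cur ++ [p]) := by simp [ttwG, hsep']
      rw [hstep, ih ws (cur ++ [p])]
      cases hc : cur.isEmpty with
      | true =>
        have hcur : cur = [] := by cases cur <;> simp_all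
        subst hcur
        simp [ttwSplit_cons_word hsep']
      | false =>
        simp [htw, hdw]

-- ===== VERDICT (by name: the statement is the Claim_ definition above) =====
theorem tokens_to_words_spec : Claim_equal_tokens_to_words := by
  intro tokens vocab _
  unfold Spec_tokens_to_words tokens_to_words tokens_to_words_alt
  show ttwFinalize (tokens.foldl (t2wStep vocab) ([], [])) = _
  rw [t2wStep_eq_filterMap, ttw_main]
  simp
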